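-- pv_equiv track=rewrite | github.com/RohanModi-CA/BlockSSH | track/.archive/2b.repair_unrepairable_black.py | build_focus_indices
-- ===== SOURCE A (Python) =====
-- def build_focus_indices(n_frames: int, bad_indices: list[int], context: int) -> list[int]:
--     focus = set()
--     for idx in bad_indices:
--         lo = max(0, idx - context)
--         hi = min(n_frames - 1, idx + context)
--         for k in range(lo, hi + 1):
--             focus.add(k)
--     return sorted(focus)
-- ===== SOURCE B (Python) =====
-- def build_focus_indices(n_frames: int, bad_indices: list[int], context: int) -> list[int]:
--     out = []
--     for idx in sorted(bad_indices):
--         lo = max(idx - context, 0)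
--         hi = min(idx + context, n_frames - 1)
--         if out:
--             lo = max(lo, out[-1] + 1)
--         out.extend(range(lo, hi + 1))
--     return out
-- ===== Notes on version B (the rewrite author's own statement) =====
-- stated objective: faster
-- what changed: Instead of inserting every frame of every context window into a set and sorting it, B sorts the bad indices once and sweeps them left to right, emitting each clamped window only from one past the last emitted frame, so each output frame is produced exactly once and no set or final sort is needed.
import Mathlib
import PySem

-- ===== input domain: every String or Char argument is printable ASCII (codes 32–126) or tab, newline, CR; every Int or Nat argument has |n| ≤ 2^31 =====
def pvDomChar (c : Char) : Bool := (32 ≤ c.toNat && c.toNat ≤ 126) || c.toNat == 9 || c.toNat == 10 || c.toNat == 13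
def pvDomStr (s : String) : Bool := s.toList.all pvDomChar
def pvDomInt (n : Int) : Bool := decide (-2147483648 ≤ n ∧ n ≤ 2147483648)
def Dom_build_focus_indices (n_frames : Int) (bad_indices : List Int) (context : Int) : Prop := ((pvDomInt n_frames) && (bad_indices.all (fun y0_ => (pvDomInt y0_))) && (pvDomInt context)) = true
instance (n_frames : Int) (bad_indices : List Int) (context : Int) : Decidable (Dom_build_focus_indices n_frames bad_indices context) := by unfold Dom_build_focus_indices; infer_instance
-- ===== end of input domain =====

-- B replaces A's per-frame set insertion + final sort by a single sorted sweep that emits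
-- each clamped context window from one past the last emitted frame (objective: faster,
-- constant-factor: no set, no final sort, each output frame produced once).

-- ===== PORT A =====
def build_focus_indices (n_frames : Int) (bad_indices : List Int) (context : Int) : List Int :=
  let focus : PySem.Set Int :=
    bad_indices.foldl (fun focus idx =>
      let lo := max 0 (idx - context)
      let hi := min (n_frames - 1) (idx + context)
      (PySem.List.pyRange lo (hi + 1) 1).foldl (fun s k => PySem.Set.add s k) focus) []
  PySem.List.sorted focus (fun x => x) false

-- ===== PORT B =====
def bfiStep (n_frames : Int) (context : Int) (out : List Int) (idx : Int) : List Int :=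
  let lo := max (idx - context) 0
  let hi := min (idx + context) (n_frames - 1)
  let lo' := match out.getLast? with
    | some l => max lo (l + 1)
    | none => lo
  out ++ PySem.List.pyRange lo' (hi + 1) 1

def build_focus_indices_alt (n_frames : Int) (bad_indices : List Int) (context : Int) : List Int :=
  (PySem.List.sorted bad_indices (fun x => x) false).foldl (bfiStep n_frames context) []

-- ===== PRECONDITION & SPEC =====
def Spec_build_focus_indices (n_frames : Int) (bad_indices : List Int) (context : Int) (out : List Int) : Prop := out = build_focus_indices_alt n_frames bad_indices context
instance (n_frames : Int) (bad_indices : List Int) (context : Int) (out : List Int) : Decidable (Spec_build_focus_indices n_frames bad_indices context out) := by unfold Spec_build_focus_indices; infer_instance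

-- ===== CLAIM (what is proved, stated in full; the proofs are below) =====
def Claim_equal_build_focus_indices : Prop := ∀ (n_frames : Int) (bad_indices : List Int) (context : Int), Dom_build_focus_indices n_frames bad_indices context → Spec_build_focus_indices n_frames bad_indices context (build_focus_indices n_frames bad_indices context)

-- ===== LEMMAS AND PROOFS =====

-- "frame k lies in the clamped context window of bad index j"
def covI (n c j k : Int) : Prop := max (j - c) 0 ≤ k ∧ k < min (j + c) (n - 1) + 1

-- the set loop: Nodup preserved, membership is accumulator ∪ elements
theorem addAll_spec (xs : List Int) : ∀ s : List Int, s.Nodup →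
    (xs.foldl (fun s k => PySem.Set.add s k) s).Nodup ∧
    (∀ k : Int, k ∈ xs.foldl (fun s k => PySem.Set.add s k) s ↔ k ∈ s ∨ k ∈ xs) := by
  induction xs with
  | nil => intro s hs; simp [hs]
  | cons x xs ih =>
    intro s hs
    have h := ih (PySem.Set.add s x) (PySem.Set.nodup_add s x hs)
    refine ⟨h.1, fun k => ?_⟩
    rw [List.foldl_cons, (h.2 k), PySem.Set.mem_add]
    simp only [List.mem_cons]
    tauto

-- A's focus set: Nodup, membership = union of clamped windows
theorem focus_spec (n c : Int) (bad : List Int) : ∀ s : List Int, s.Nodup →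
    (bad.foldl (fun focus idx =>
      (PySem.List.pyRange (max 0 (idx - c)) (min (n - 1) (idx + c) + 1) 1).foldl
        (fun s k => PySem.Set.add s k) focus) s).Nodup ∧
    (∀ k : Int, k ∈ bad.foldl (fun focus idx =>
      (PySem.List.pyRange (max 0 (idx - c)) (min (n - 1) (idx + c) + 1) 1).foldl
        (fun s k => PySem.Set.add s k) focus) s ↔ k ∈ s ∨ ∃ idx ∈ bad, covI n c idx k) := by
  induction bad with
  | nil => intro s hs; simp [hs]
  | cons b bad ih =>
    intro s hs
    have hin := addAll_spec (PySem.List.pyRange (max 0 (b - c)) (min (n - 1) (b + c) + 1) 1) s hs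
    have h := ih _ hin.1
    refine ⟨h.1, fun k => ?_⟩
    rw [List.foldl_cons, (h.2 k), (hin.2 k), PySem.List.mem_pyRange_one]
    simp only [List.mem_cons, covI]
    constructor
    · rintro ((hk | hk) | ⟨i, hi, hc⟩)
      · exact Or.inl hk
      · exact Or.inr ⟨b, Or.inl rfl, by omega⟩
      · exact Or.inr ⟨i, Or.inr hi, hc⟩
    · rintro (hk | ⟨i, (rfl | hi), hc⟩)
      · exact Or.inl (Or.inl hk)
      · exact Or.inl (Or.inr (by omega))
      · exact Or.inr ⟨i, hi, hc⟩

-- in a strictly increasing list the last element bounds every element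
theorem last_bounds {out : List Int} (h : out.Pairwise (· < ·)) {L : Int}
    (hL : out.getLast? = some L) : ∀ m ∈ out, m ≤ L := by
  induction out with
  | nil => simp at hL
  | cons a t ih =>
    intro m hm
    cases t with
    | nil =>
      simp at hL
      simp at hm
      omega
    | cons b t' =>
      rw [List.getLast?_cons_cons] at hL
      rcases List.mem_cons.mp hm with rfl | hm'
      · have hb := (List.pairwise_cons.mp h).1
        have hbL := ih (List.pairwise_cons.mp h).2 hL b (List.mem_cons_self)
        exact le_of_lt (lt_of_lt_of_le (hb b List.mem_cons_self) hbL)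
      · exact ih (List.pairwise_cons.mp h).2 hL m hm'

-- main sweep invariant for B's loop: out holds exactly the union of the windows of
-- the already-processed indices proc, strictly increasing
theorem sweep_spec (n c : Int) (l : List Int) : ∀ (out proc : List Int),
    out.Pairwise (· < ·) →
    (∀ k, k ∈ out ↔ ∃ j ∈ proc, covI n c j k) →
    (∀ j ∈ proc, ∀ i ∈ l, j ≤ i) →
    l.Pairwise (· ≤ ·) →
    (l.foldl (bfiStep n c) out).Pairwise (· < ·) ∧
    (∀ k, k ∈ l.foldl (bfiStep n c) out ↔ ∃ j ∈ proc ++ l, covI n c j k) := by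
  induction l with
  | nil =>
    intro out proc hpw hmem _ _
    exact ⟨hpw, fun k => by simpa using hmem k⟩
  | cons idx rest ih =>
    intro out proc hpw hmem hproc hsorted
    have hsr := List.pairwise_cons.mp hsorted
    set lo := max (idx - c) 0 with hlo
    set hi := min (idx + c) (n - 1) with hhi
    set lo' := (match out.getLast? with
      | some l => max lo (l + 1)
      | none => lo) with hlo'
    have hstep : bfiStep n c out idx = out ++ PySem.List.pyRange lo' (hi + 1) 1 := rfl
    have hlo_le : lo ≤ lo' := by
      rw [hlo']; cases h : out.getLast? <;> simp
    have hout_lt : ∀ m ∈ out, m < lo' := by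
      intro m hm
      cases h : out.getLast? with
      | none => exact absurd hm (by simp [List.getLast?_eq_none_iff.mp h])
      | some L =>
        have := last_bounds hpw h m hm
        rw [hlo', h]; simp; omega
    have hpw' : (out ++ PySem.List.pyRange lo' (hi + 1) 1).Pairwise (· < ·) := by
      rw [List.pairwise_append]
      refine ⟨hpw, PySem.List.pairwise_lt_pyRange_one lo' (hi + 1), ?_⟩
      intro a ha b hb
      have hb' := (PySem.List.mem_pyRange_one).mp hb
      have := hout_lt a ha
      omega
    have hmem' : ∀ k, k ∈ out ++ PySem.List.pyRange lo' (hi + 1) 1 ↔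
        ∃ j ∈ proc ++ [idx], covI n c j k := by
      intro k
      rw [List.mem_append, PySem.List.mem_pyRange_one, hmem]
      constructor
      · rintro (⟨j, hj, hjc⟩ | hk)
        · exact ⟨j, List.mem_append_left _ hj, hjc⟩
        · exact ⟨idx, List.mem_append_right _ (by simp), by constructor <;> omega⟩
      · rintro ⟨j, hj, hjc⟩
        rcases List.mem_append.mp hj with hj | hj
        · exact Or.inl ⟨j, hj, hjc⟩
        · -- j = idx: k lies in idx's window
          have hj' : j = idx := by simpa using hj
          subst hj'
          obtain ⟨h1, h2⟩ := hjc
          by_cases hge : lo' ≤ k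
          · exact Or.inr ⟨hge, by omega⟩
          · -- k < lo': out nonempty with last L, k ≤ L, and L's witness window covers k
            left
            cases h : out.getLast? with
            | none =>
              have hl : lo' = lo := by rw [hlo', h]
              exact absurd hge (by omega)
            | some L =>
              have hLmem : L ∈ out := List.mem_of_getLast? h
              obtain ⟨j', hj', hjc'⟩ := (hmem L).mp hLmem
              have hj'idx : j' ≤ j := hproc j' hj' j List.mem_cons_self
              have hl : lo' = max lo (L + 1) := by rw [hlo', h]
              simp only [covI] at hjc'
              exact ⟨j', hj', by simp only [covI]; omega⟩
    have hmono : ∀ j ∈ proc ++ [idx], ∀ i ∈ rest, j ≤ i := by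
      intro j hj i hi
      rcases List.mem_append.mp hj with hj | hj
      · exact hproc j hj i (List.mem_cons_of_mem _ hi)
      · have : j = idx := by simpa using hj
        exact this ▸ hsr.1 i hi
    have := ih (out ++ PySem.List.pyRange lo' (hi + 1) 1) (proc ++ [idx]) hpw' hmem' hmono hsr.2
    rw [List.foldl_cons, hstep]
    refine ⟨this.1, fun k => ?_⟩
    rw [this.2 k]
    constructor
    · rintro ⟨j, hj, hjc⟩
      refine ⟨j, ?_, hjc⟩
      simp only [List.mem_append, List.mem_cons] at hj ⊢
      tauto
    · rintro ⟨j, hj, hjc⟩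
      refine ⟨j, ?_, hjc⟩
      simp only [List.mem_append, List.mem_cons] at hj ⊢
      tauto

-- ===== VERDICT (by name: the statement is the Claim_ definition above) =====
theorem build_focus_indices_spec : Claim_equal_build_focus_indices := by
  intro n bad c _
  unfold Spec_build_focus_indices build_focus_indices build_focus_indices_alt
  -- facts about A's set
  have hA := focus_spec n c bad [] List.nodup_nil
  simp only [List.not_mem_nil, false_or] at hA
  -- facts about B's sweep
  have hsortpw : (PySem.List.sorted bad (fun x => x) false).Pairwise (· ≤ ·) := by
    have := PySem.List.sorted_pairwise (xs := bad) (key := fun x => x)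
    simpa using this
  have hB := sweep_spec n c (PySem.List.sorted bad (fun x => x) false) [] []
    List.Pairwise.nil (by simp) (by simp) hsortpw
  simp only [List.nil_append] at hB
  -- B's result is a strictly increasing rearrangement of A's set, hence equals sorted(A's set)
  apply PySem.List.sorted_eq_of_perm_of_pairwise_lt
  · -- Perm: both Nodup with the same members
    apply (List.perm_ext_iff_of_nodup ?_ ?_).mpr
    · intro k
      rw [hB.2 k, hA.2 k]
      constructor
      · rintro ⟨j, hj, hjc⟩
        exact ⟨j, (PySem.List.mem_sorted _ _ _ _).mp hj, hjc⟩
      · rintro ⟨j, hj, hjc⟩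
        exact ⟨j, (PySem.List.mem_sorted _ _ _ _).mpr hj, hjc⟩
    · exact hB.1.nodup
    · exact hA.1
  · simpa using hB.1
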